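-- pv_equiv track=rewrite | github.com/switch263/BLBot | cogs/vaporwave.py | _vaporize
-- ===== SOURCE A (Python) =====
-- def _vaporize(text: str) -> str:
--     result = ""
--     for char in text:
--         code = ord(char)
--         # Convert ASCII printable to fullwidth equivalents
--         if 0x21 <= code <= 0x7E:
--             result += chr(code + 0xFEE0)
--         elif char == " ":
--             result += "\u3000"  # fullwidth space
--         else:
--             result += char
--     return result
-- ===== SOURCE B (Python) =====
-- def _vaporize(text: str) -> str:
--     # Alphabet-major strategy: one whole-string replace pass per code point.
--     # Correct because replacements land outside ASCII, so later passes never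
--     # touch characters produced by earlier ones.
--     out = text.replace(" ", "\u3000")
--     for code in range(0x21, 0x7F):
--         out = out.replace(chr(code), chr(code + 0xFEE0))
--     return out
-- ===== Notes on version B (the rewrite author's own statement) =====
-- stated objective: alternative
-- what changed: Instead of one pass over the text with per-character branching and concatenation, B iterates over the 95-symbol alphabet, performing one whole-string str.replace pass per code point (space first), relying on replaced characters being non-ASCII so passes commute.
import Mathlib
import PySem

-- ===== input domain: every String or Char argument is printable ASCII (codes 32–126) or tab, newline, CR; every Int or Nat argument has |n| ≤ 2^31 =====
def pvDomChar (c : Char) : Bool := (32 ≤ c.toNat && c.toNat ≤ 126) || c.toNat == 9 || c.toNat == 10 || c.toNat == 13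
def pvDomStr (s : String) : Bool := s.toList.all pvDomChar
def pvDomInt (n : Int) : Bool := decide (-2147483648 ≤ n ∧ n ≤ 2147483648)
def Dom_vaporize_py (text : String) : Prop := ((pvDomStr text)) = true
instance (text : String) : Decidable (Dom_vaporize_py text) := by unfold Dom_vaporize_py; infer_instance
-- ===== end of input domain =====

-- B replaces A's text-major per-character loop by an alphabet-major chain of whole-string replace passes (alternative; return value only).

-- ===== PORT A =====
def vaporize_py (text : String) : String :=
  String.mk (text.toList.foldl (fun result char =>
    let code : Int := (char.toNat : Int)
    if 0x21 ≤ code ∧ code ≤ 0x7E then result ++ [Char.ofNat (code + 0xFEE0).toNat]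
    else if char = ' ' then result ++ ['\u3000']
    else result ++ [char]) [])

-- ===== PORT B =====
-- out = text.replace(" ", "\u3000"), then one replace pass per code in range(0x21, 0x7F)
def vaporize_py_alt (text : String) : String :=
  (PySem.List.pyRange 0x21 0x7F 1).foldl
    (fun out code =>
      PySem.Str.replace out (String.mk [Char.ofNat code.toNat])
        (String.mk [Char.ofNat (code + 0xFEE0).toNat]))
    (PySem.Str.replace text " " "\u3000")

-- ===== PRECONDITION & SPEC =====
def Spec_vaporize_py (text : String) (out : String) : Prop := out = vaporize_py_alt text
instance (text : String) (out : String) : Decidable (Spec_vaporize_py text out) := by unfold Spec_vaporize_py; infer_instance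

-- ===== CLAIM (what is proved, stated in full; the proofs are below) =====
def Claim_equal_vaporize_py : Prop := ∀ (text : String), Dom_vaporize_py text → Spec_vaporize_py text (vaporize_py text)

-- ===== LEMMAS AND PROOFS =====

-- single-character substitution, the effect of a one-char str.replace
lemma toList_mk (l : List Char) : (String.mk l).toList = l :=
  Eq.symm (String.ofList_eq.mp rfl)

def substC (c d x : Char) : Char := if x = c then d else x

lemma go_single (c d : Char) (fuel : Nat) (l acc : List Char) (h : l.length ≤ fuel) :
    PySem.Chars.replace.go [c] [d] fuel l acc = acc.reverse ++ l.map (substC c d) := by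
  induction fuel generalizing l acc with
  | zero =>
    have : l = [] := List.length_eq_zero_iff.mp (Nat.le_zero.mp h)
    subst this
    simp [PySem.Chars.replace.go]
  | succ n ih =>
    cases l with
    | nil => simp [PySem.Chars.replace.go]
    | cons x t =>
      simp only [PySem.Chars.replace.go]
      by_cases hx : x = c
      · subst hx
        rw [if_pos (by simp [List.isPrefixOf])]
        simp only [List.length_cons, List.length_nil, List.drop_succ_cons, List.drop_zero]
        simp only [List.length_cons] at h
        rw [ih _ _ (by omega)]
        simp [substC]
      · rw [if_neg (by simp only [List.isPrefixOf, Bool.and_true,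
          beq_iff_eq]; exact fun hh => hx hh.symm)]
        simp only [List.length_cons] at h
        rw [ih _ _ (by omega)]
        simp [substC, hx]

lemma replace_single (c d : Char) (l : List Char) :
    PySem.Chars.replace l [c] [d] = l.map (substC c d) := by
  unfold PySem.Chars.replace
  rw [if_neg (by simp), go_single c d l.length l [] le_rfl]
  simp

lemma fold_range (a b : Int) (h0 : 0 ≤ a) (hb : b ≤ 0x7F) (s : String) :
    ((PySem.List.pyRange a b 1).foldl
      (fun out code =>
        PySem.Str.replace out (String.mk [Char.ofNat code.toNat])
          (String.mk [Char.ofNat (code + 0xFEE0).toNat])) s).toList =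
    s.toList.map (fun x =>
      if a ≤ (x.toNat : Int) ∧ (x.toNat : Int) < b then Char.ofNat (x.toNat + 0xFEE0) else x) := by
  by_cases hab : a < b
  · rw [PySem.List.pyRange_one_cons hab, List.foldl_cons,
      fold_range (a + 1) b (by omega) hb]
    rw [PySem.Str.toList_replace, toList_mk, toList_mk, replace_single, List.map_map]
    apply List.map_congr_left
    intro x _
    simp only [Function.comp, substC]
    have ha7 : a.toNat < 0xD800 := by omega
    have hofa : (Char.ofNat a.toNat).toNat = a.toNat := by
      rw [Char.toNat_ofNat, if_pos (Or.inl (by omega))]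
    by_cases hx : x = Char.ofNat a.toNat
    · subst hx
      rw [if_pos rfl]
      have hcd : (Char.ofNat (a + 0xFEE0).toNat).toNat = (a + 0xFEE0).toNat := by
        rw [Char.toNat_ofNat, if_pos (Or.inr ⟨by omega, by omega⟩)]
      rw [if_neg (by rw [hcd]; omega), if_pos (by rw [hofa]; omega)]
      congr 1
      rw [hofa]
      omega
    · rw [if_neg hx]
      have hxa : (x.toNat : Int) ≠ a := by
        intro hn
        apply hx
        apply Char.ext
        apply UInt32.toNat_inj.mp
        show x.toNat = (Char.ofNat a.toNat).toNat
        rw [hofa]; omega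
      by_cases hc : a ≤ (x.toNat : Int) ∧ (x.toNat : Int) < b
      · rw [if_pos (by omega : (a + 1 ≤ (x.toNat : Int) ∧ (x.toNat : Int) < b)), if_pos hc]
      · rw [if_neg (by omega), if_neg hc]
  · rw [PySem.List.pyRange_one, Int.toNat_of_nonpos (by omega)]
    simp only [List.range_zero, List.map_nil, List.foldl_nil]
    symm
    apply List.map_id''
    intro x
    rw [if_neg (by omega)]
  termination_by (b - a).toNat
  decreasing_by omega

-- A's loop body, as the character it appends
def vaporizeStep (char : Char) : Char :=
  let code : Int := (char.toNat : Int)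
  if 0x21 ≤ code ∧ code ≤ 0x7E then Char.ofNat (code + 0xFEE0).toNat
  else if char = ' ' then '\u3000'
  else char

lemma vaporize_foldl (l acc : List Char) :
    (l.foldl (fun result char =>
      let code : Int := (char.toNat : Int)
      if 0x21 ≤ code ∧ code ≤ 0x7E then result ++ [Char.ofNat (code + 0xFEE0).toNat]
      else if char = ' ' then result ++ ['\u3000']
      else result ++ [char]) acc) = acc ++ l.map vaporizeStep := by
  induction l generalizing acc with
  | nil => simp
  | cons c t ih =>
    simp only [List.foldl_cons, List.map_cons, ih, vaporizeStep]
    split_ifs <;> simp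

lemma step_combined (c : Char) :
    vaporizeStep c =
      ((fun x => if 0x21 ≤ (x.toNat : Int) ∧ (x.toNat : Int) < 0x7F
                 then Char.ofNat (x.toNat + 0xFEE0) else x) ∘ substC ' ' '\u3000') c := by
  simp only [Function.comp, substC, vaporizeStep]
  by_cases hsp : c = ' '
  · subst hsp; decide
  · simp only [if_neg hsp]
    by_cases h : 0x21 ≤ (c.toNat : Int) ∧ (c.toNat : Int) ≤ 0x7E
    · have hn : ((c.toNat : Int) + 0xFEE0).toNat = c.toNat + 0xFEE0 := by omega
      rw [if_pos h, if_pos (by omega), hn]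
    · rw [if_neg h, if_neg (by omega)]

-- ===== VERDICT (by name: the statement is the Claim_ definition above) =====
theorem vaporize_py_spec : Claim_equal_vaporize_py := by
  intro text _
  unfold Spec_vaporize_py vaporize_py vaporize_py_alt
  rw [vaporize_foldl]
  simp only [List.nil_append]
  apply String.toList_inj.mp
  rw [fold_range 0x21 0x7F (by omega) le_rfl]
  rw [PySem.Str.toList_replace]
  have hsp : (" " : String).toList = [' '] := by decide
  have hfw : ("\u3000" : String).toList = ['\u3000'] := by decide
  rw [hsp, hfw, replace_single, List.map_map, toList_mk]
  apply List.map_congr_left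
  intro c _
  exact step_combined c
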